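-- pv_equiv track=rewrite | github.com/m4ll0k/Atlas | tamper/mysql_space2mysqldash.py | mysql_space2mysqldash
-- ===== SOURCE A (Python) =====
-- def mysql_space2mysqldash(payload):
-- 	# -- mysql -- #
-- 	_payload = payload
-- 	if payload:
-- 		_payload = ""
-- 		for i in range(len(payload)):
-- 			if payload[i].isspace():
-- 				_payload+="--%0A"
-- 			elif payload[i]=='#' or payload[i:i+3]=='-- ':
-- 				_payload+=payload[i:]
-- 				break
-- 			else:
-- 				_payload += payload[i]
-- 	return _payload
-- ===== SOURCE B (Python) =====
-- def mysql_space2mysqldash(payload):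
--     if not payload:
--         return payload
--     finds = [k for k in (payload.find('#'), payload.find('-- ')) if k != -1]
--     j = min(finds, default=len(payload))
--     return ''.join('--%0A' if c.isspace() else c for c in payload[:j]) + payload[j:]
-- ===== Notes on version B (the rewrite author's own statement) =====
-- stated objective: faster
-- what changed: Replaced the single character loop with an in-loop break and repeated 3-char slice comparisons by one str.find-based search pass computing the cut index, then a single join mapping each prefix character and concatenating the untouched suffix.
import Mathlib
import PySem

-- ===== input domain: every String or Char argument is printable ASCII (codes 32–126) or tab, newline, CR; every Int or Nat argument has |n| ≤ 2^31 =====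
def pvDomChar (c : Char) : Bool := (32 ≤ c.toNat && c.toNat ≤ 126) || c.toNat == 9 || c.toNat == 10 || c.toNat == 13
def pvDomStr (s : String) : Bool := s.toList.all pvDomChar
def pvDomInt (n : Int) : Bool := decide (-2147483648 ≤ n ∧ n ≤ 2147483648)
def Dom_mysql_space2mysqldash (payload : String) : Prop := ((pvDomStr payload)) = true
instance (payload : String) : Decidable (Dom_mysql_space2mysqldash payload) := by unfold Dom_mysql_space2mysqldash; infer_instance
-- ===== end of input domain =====

-- B replaces A's loop-with-break (per-index slice tests and string concatenation) by a find-based cut index plus one join over the prefix; measured faster by a constant factor.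

-- ===== PORT A =====
-- literal port of A's for-loop with break: index recursion carrying the accumulator
def mysqlA_go (cs : List Char) (i : Nat) (acc : List Char) : List Char :=
  if h : i < cs.length then
    if PySem.Chars.isspace cs[i] then
      mysqlA_go cs (i + 1) (acc ++ ('-' :: '-' :: '%' :: '0' :: 'A' :: []))
    else if cs[i] = '#' ∨ PySem.List.slice cs (some (i : Int)) (some ((i : Int) + 3)) = ('-' :: '-' :: ' ' :: []) then
      acc ++ PySem.List.slice cs (some (i : Int)) none
    else
      mysqlA_go cs (i + 1) (acc ++ [cs[i]])
  else acc
termination_by cs.length - i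

def mysql_space2mysqldash (payload : String) : String :=
  if payload.toList = [] then payload
  else String.ofList (mysqlA_go payload.toList 0 [])

-- ===== PORT B =====
-- B: cut index = smallest non-(-1) among find('#') and find('-- '), default len
def mysqlB_cut (cs : List Char) : Nat :=
  let finds := ([PySem.Chars.find cs ['#'], PySem.Chars.find cs ('-' :: '-' :: ' ' :: [])].filter (fun k => k ≠ -1))
  match finds.min? with
  | some m => m.toNat
  | none => cs.length

def mysql_space2mysqldash_alt (payload : String) : String :=
  if payload.toList = [] then payload
  else
    let cs := payload.toList
    let j := mysqlB_cut cs
    String.ofList ((cs.take j).flatMap (fun c => if PySem.Chars.isspace c then '-' :: '-' :: '%' :: '0' :: 'A' :: [] else [c]) ++ cs.drop j)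

-- ===== PRECONDITION & SPEC =====
def Spec_mysql_space2mysqldash (payload : String) (out : String) : Prop := out = mysql_space2mysqldash_alt payload
instance (payload : String) (out : String) : Decidable (Spec_mysql_space2mysqldash payload out) := by unfold Spec_mysql_space2mysqldash; infer_instance

-- ===== CLAIM (what is proved, stated in full; the proofs are below) =====
def Claim_equal_mysql_space2mysqldash : Prop := ∀ (payload : String), Dom_mysql_space2mysqldash payload → Spec_mysql_space2mysqldash payload (mysql_space2mysqldash payload)

-- ===== LEMMAS AND PROOFS =====

-- the cut condition A's break tests at index i
def pvP (cs : List Char) (i : Nat) : Prop :=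
  ['#'] <+: cs.drop i ∨ ('-' :: '-' :: ' ' :: []) <+: cs.drop i

-- the per-character expansion
def pvF (c : Char) : List Char :=
  if PySem.Chars.isspace c then '-' :: '-' :: '%' :: '0' :: 'A' :: [] else [c]

lemma pv_no_occ {cs sub : List Char} (h : PySem.Chars.find cs sub = -1) :
    ∀ k, ¬ sub <+: cs.drop k := by
  intro k hk
  have : sub <:+: cs := by
    have := (PySem.Chars.exists_prefix_drop_iff_isIn (s := cs) (sub := sub)).mp ⟨k, hk⟩
    exact (PySem.Chars.isIn_iff_infix sub cs).mp this
  exact (PySem.Chars.find_eq_neg_one_iff cs sub).mp h this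

lemma pv_occ_spec {cs sub : List Char} (h : PySem.Chars.find cs sub ≠ -1) :
    0 ≤ PySem.Chars.find cs sub ∧ (PySem.Chars.find cs sub).toNat ≤ cs.length ∧
    sub <+: cs.drop (PySem.Chars.find cs sub).toNat ∧
    ∀ i < (PySem.Chars.find cs sub).toNat, ¬ sub <+: cs.drop i := by
  have hge : -1 ≤ PySem.Chars.find cs sub := PySem.Chars.neg_one_le_find cs sub
  have h0 : 0 ≤ PySem.Chars.find cs sub := by omega
  have hle : PySem.Chars.find cs sub ≤ cs.length := PySem.Chars.find_le_length cs sub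
  have hsp := PySem.Chars.find_spec (s := cs) (sub := sub) h0
  exact ⟨h0, by omega, hsp.1, hsp.2⟩

lemma pv_cut_spec (cs : List Char) :
    mysqlB_cut cs ≤ cs.length ∧ (∀ k < mysqlB_cut cs, ¬ pvP cs k) ∧
    (mysqlB_cut cs < cs.length → pvP cs (mysqlB_cut cs)) := by
  set a := PySem.Chars.find cs ['#'] with ha'
  set b := PySem.Chars.find cs ('-' :: '-' :: ' ' :: []) with hb'
  by_cases ha : a = -1 <;> by_cases hb : b = -1
  · have hcut : mysqlB_cut cs = cs.length := by
      simp [mysqlB_cut, ← ha', ← hb', ha, hb, List.filter]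
    refine ⟨le_of_eq hcut, ?_, by omega⟩
    intro k _ hk
    rcases hk with hk | hk
    · exact pv_no_occ ha k hk
    · exact pv_no_occ hb k hk
  · obtain ⟨h0, hle, hpre, hmin⟩ := pv_occ_spec (cs := cs) hb
    have hcut : mysqlB_cut cs = b.toNat := by
      simp [mysqlB_cut, ← ha', ← hb', ha, hb, List.filter, List.min?]
    refine ⟨hcut ▸ hle, ?_, fun _ => ?_⟩
    · intro k hk hPk
      rw [hcut] at hk
      rcases hPk with hP | hP
      · exact pv_no_occ ha k hP
      · exact hmin k hk hP
    · rw [hcut]; exact Or.inr hpre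
  · obtain ⟨h0, hle, hpre, hmin⟩ := pv_occ_spec (cs := cs) ha
    have hcut : mysqlB_cut cs = a.toNat := by
      simp [mysqlB_cut, ← ha', ← hb', ha, hb, List.filter, List.min?]
    refine ⟨hcut ▸ hle, ?_, fun _ => ?_⟩
    · intro k hk hPk
      rw [hcut] at hk
      rcases hPk with hP | hP
      · exact hmin k hk hP
      · exact pv_no_occ hb k hP
    · rw [hcut]; exact Or.inl hpre
  · obtain ⟨ha0, hale, hapre, hamin⟩ := pv_occ_spec (cs := cs) ha
    obtain ⟨hb0, hble, hbpre, hbmin⟩ := pv_occ_spec (cs := cs) hb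
    have hcut : mysqlB_cut cs = (min a b).toNat := by
      simp [mysqlB_cut, ← ha', ← hb', ha, hb, List.filter, List.min?]
    refine ⟨by rw [hcut]; omega, ?_, fun _ => ?_⟩
    · intro k hk hPk
      rw [hcut] at hk
      rcases hPk with hP | hP
      · exact hamin k (by omega) hP
      · exact hbmin k (by omega) hP
    · rw [hcut]
      rcases le_total a b with hab | hab
      · have : (min a b).toNat = a.toNat := by omega
        rw [this]; exact Or.inl hapre
      · have : (min a b).toNat = b.toNat := by omega
        rw [this]; exact Or.inr hbpre

-- A's slice test at i equals the prefix condition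
lemma pv_slice_eq (cs : List Char) (i : Nat) :
    PySem.List.slice cs (some (i : Int)) (some ((i : Int) + 3)) = (cs.drop i).take 3 := by
  have : ((i : Int) + 3) = (((i + 3 : Nat) : Int)) := by push_cast; ring
  rw [this, PySem.List.slice_natCast]
  congr 1
  omega

lemma pv_cond_iff (cs : List Char) (i : Nat) (hi : i < cs.length) :
    (cs[i] = '#' ∨ PySem.List.slice cs (some (i : Int)) (some ((i : Int) + 3)) = ('-' :: '-' :: ' ' :: [])) ↔ pvP cs i := by
  have hdrop : cs.drop i = cs[i] :: cs.drop (i + 1) := List.drop_eq_getElem_cons hi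
  rw [pv_slice_eq]
  constructor
  · rintro (h | h)
    · exact Or.inl (by rw [hdrop, h]; exact ⟨cs.drop (i + 1), rfl⟩)
    · exact Or.inr (by rw [List.prefix_iff_eq_take]; exact h.symm)
  · rintro (h | h)
    · left
      rw [hdrop] at h
      obtain ⟨t, ht⟩ := h
      exact (List.cons.inj ht).1.symm
    · right
      rw [List.prefix_iff_eq_take] at h
      exact h.symm

lemma pv_go_eq (cs : List Char) (j : Nat) (hjle : j ≤ cs.length)
    (hmin : ∀ k < j, ¬ pvP cs k) (hj : j < cs.length → pvP cs j) :
    ∀ n i acc, i + n = j →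
      mysqlA_go cs i acc = acc ++ ((cs.drop i).take (j - i)).flatMap pvF ++ cs.drop j := by
  intro n
  induction n with
  | zero =>
    intro i acc hij
    have hij : i = j := by omega
    subst hij
    rw [mysqlA_go]
    by_cases h : i < cs.length
    · have hP := hj h
      have hdrop : cs.drop i = cs[i] :: cs.drop (i + 1) := List.drop_eq_getElem_cons h
      have hchar : cs[i] = '#' ∨ cs[i] = '-' := by
        rcases hP with hp | hp
        · obtain ⟨t, ht⟩ := hp
          rw [hdrop] at ht
          exact Or.inl (List.cons.inj ht).1.symm
        · obtain ⟨t, ht⟩ := hp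
          rw [hdrop] at ht
          exact Or.inr (List.cons.inj ht).1.symm
      have hns : PySem.Chars.isspace cs[i] = false := by
        rcases hchar with h' | h' <;> rw [h'] <;> decide
      rw [dif_pos h, hns]
      simp only [Bool.false_eq_true, if_false]
      rw [if_pos ((pv_cond_iff cs i h).mpr hP)]
      rw [PySem.List.slice_from_natCast]
      simp
    · rw [dif_neg h]
      have : cs.drop i = [] := List.drop_eq_nil_of_le (by omega)
      simp [this]
  | succ n ih =>
    intro i acc hij
    have hi : i < cs.length := by omega
    have hnP : ¬ pvP cs i := hmin i (by omega)
    have hdrop : cs.drop i = cs[i] :: cs.drop (i + 1) := List.drop_eq_getElem_cons hi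
    have hcond : ¬ (cs[i] = '#' ∨ PySem.List.slice cs (some (i : Int)) (some ((i : Int) + 3)) = ('-' :: '-' :: ' ' :: [])) :=
      fun h => hnP ((pv_cond_iff cs i hi).mp h)
    have htake : (cs.drop i).take (j - i) = cs[i] :: (cs.drop (i + 1)).take (j - (i + 1)) := by
      rw [hdrop]
      have : j - i = (j - (i + 1)) + 1 := by omega
      rw [this, List.take_succ_cons]
    rw [mysqlA_go, dif_pos hi]
    by_cases hsp : PySem.Chars.isspace cs[i]
    · rw [if_pos hsp, ih (i + 1) _ (by omega), htake]
      simp [List.flatMap_cons, pvF, hsp]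
    · rw [if_neg (by simpa using hsp), if_neg hcond, ih (i + 1) _ (by omega), htake]
      simp [List.flatMap_cons, pvF, hsp]

-- ===== VERDICT (by name: the statement is the Claim_ definition above) =====
theorem mysql_space2mysqldash_spec : Claim_equal_mysql_space2mysqldash := by
  intro payload _
  unfold Spec_mysql_space2mysqldash mysql_space2mysqldash mysql_space2mysqldash_alt
  by_cases h : payload.toList = []
  · rw [if_pos h, if_pos h]
  · rw [if_neg h, if_neg h]
    obtain ⟨hle, hmin, hj⟩ := pv_cut_spec payload.toList
    have := pv_go_eq payload.toList (mysqlB_cut payload.toList) hle hmin hj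
      (mysqlB_cut payload.toList) 0 [] (by omega)
    simp only [Nat.sub_zero, List.drop_zero, List.nil_append] at this
    rw [this]
    rfl
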